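-- pv_equiv track=rewrite | github.com/harrisonized/interview-practice | functions/iterators.py | idx_for_diag_sw_from_br
-- ===== SOURCE A (Python) =====
-- def idx_for_diag_sw_from_br(num_rows=2, num_cols=3):
--     """Traverse southwest diagonals from top left
--     Eg.
--           0   -1   -2
--         //   //   //
--     ['A', 'B', 'C'] -3
--         //   //   //
--     ['D', 'E', 'F']
--
--     Returns row and col indices for: F, C, E, B, D, A
--     """
--
--     # lower right triangle
--     for row in range(num_rows-1, 0, -1):
--         col = num_cols-1
--         while row < num_rows and col >= 0:
--             yield row, col
--             row += 1
--             col -= 1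
--
--     # upper left triangle
--     for col in range(num_cols-1, -1, -1):
--         row = 0
--         while row < num_rows and col >= 0:
--             yield row, col
--             row += 1
--             col -= 1
-- ===== SOURCE B (Python) =====
-- def idx_for_diag_sw_from_br(num_rows=2, num_cols=3):
--     # One loop over anti-diagonal sums s = row+col, from the largest down to 0;
--     # within each diagonal, the in-bounds rows ascend (so columns descend).
--     for s in range(num_rows + num_cols - 2, -1, -1):
--         for row in range(max(0, s - num_cols + 1), min(num_rows, s + 1)):
--             yield row, s - row
-- ===== Notes on version B (the rewrite author's own statement) =====
-- stated objective: simpler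
-- what changed: Replaces A's two edge-anchored triangle walks (a for over starting rows then a for over starting columns, each with an inner while stepping row+1/col-1) by a single loop over the anti-diagonal sum s from num_rows+num_cols-2 down to 0, yielding (row, s-row) over the clipped in-bounds row range of each diagonal.
import Mathlib
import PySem

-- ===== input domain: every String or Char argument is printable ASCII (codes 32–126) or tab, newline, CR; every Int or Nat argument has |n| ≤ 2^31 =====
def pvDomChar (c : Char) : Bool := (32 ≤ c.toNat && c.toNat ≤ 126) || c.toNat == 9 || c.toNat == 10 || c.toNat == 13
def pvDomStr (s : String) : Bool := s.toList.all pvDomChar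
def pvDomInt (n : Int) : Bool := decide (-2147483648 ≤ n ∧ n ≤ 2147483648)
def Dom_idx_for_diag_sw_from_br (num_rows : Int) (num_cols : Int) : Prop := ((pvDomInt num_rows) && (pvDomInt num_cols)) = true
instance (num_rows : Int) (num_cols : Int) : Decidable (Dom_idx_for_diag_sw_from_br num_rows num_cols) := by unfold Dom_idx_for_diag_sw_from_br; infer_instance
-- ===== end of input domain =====

-- B replaces A's two edge-anchored triangle walks by a single loop over the
-- anti-diagonal sum s (descending), emitting (row, s - row) for in-bounds rows
-- ascending — a simpler decomposition producing the same sequence.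

-- ===== PORT A =====
-- inner 'while row < num_rows and col >= 0: yield row, col; row += 1; col -= 1'
def pvWalkA (num_rows : Int) (row col : Int) : List (Int × Int) :=
  if h : row < num_rows ∧ 0 ≤ col then
    (row, col) :: pvWalkA num_rows (row + 1) (col - 1)
  else []
termination_by (num_rows - row).toNat
decreasing_by omega

def idx_for_diag_sw_from_br (num_rows : Int) (num_cols : Int) : List (Int × Int) :=
  -- lower right triangle: for row in range(num_rows-1, 0, -1)
  let first := (PySem.List.pyRange (num_rows - 1) 0 (-1)).foldl
    (fun acc row => acc ++ pvWalkA num_rows row (num_cols - 1)) []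
  -- upper left triangle: for col in range(num_cols-1, -1, -1)
  (PySem.List.pyRange (num_cols - 1) (-1) (-1)).foldl
    (fun acc col => acc ++ pvWalkA num_rows 0 col) first

-- ===== PORT B =====
-- inner 'for row in range(max(0, s - num_cols + 1), min(num_rows, s + 1)): yield row, s - row'
def pvInnerB (num_rows : Int) (num_cols : Int) (s : Int) : List (Int × Int) :=
  (PySem.List.pyRange (max 0 (s - num_cols + 1)) (min num_rows (s + 1)) 1).foldl
    (fun acc row => acc ++ [(row, s - row)]) []

def idx_for_diag_sw_from_br_alt (num_rows : Int) (num_cols : Int) : List (Int × Int) :=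
  (PySem.List.pyRange (num_rows + num_cols - 2) (-1) (-1)).foldl
    (fun acc s => acc ++ pvInnerB num_rows num_cols s) []

-- ===== PRECONDITION & SPEC =====
def Spec_idx_for_diag_sw_from_br (num_rows : Int) (num_cols : Int) (out : List (Int × Int)) : Prop := out = idx_for_diag_sw_from_br_alt num_rows num_cols
instance (num_rows : Int) (num_cols : Int) (out : List (Int × Int)) : Decidable (Spec_idx_for_diag_sw_from_br num_rows num_cols out) := by unfold Spec_idx_for_diag_sw_from_br; infer_instance

-- ===== CLAIM =====
def Claim_equal_idx_for_diag_sw_from_br : Prop := ∀ (num_rows : Int) (num_cols : Int), Dom_idx_for_diag_sw_from_br num_rows num_cols → Spec_idx_for_diag_sw_from_br num_rows num_cols (idx_for_diag_sw_from_br num_rows num_cols)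

-- ===== LEMMAS AND PROOFS =====

-- normal form of one anti-diagonal s: its in-bounds cells (r, s - r), r ascending
def pvDiag (R C s : Int) : List (Int × Int) :=
  (PySem.List.pyRange (max 0 (s - C + 1)) (min R (s + 1)) 1).map (fun r => (r, s - r))

-- A's inner while-walk along a diagonal is the cells (r, row+col-r) for r from row up to min R (row+col+1)
lemma walk_eq (R : Int) : ∀ (n : Nat) (row col : Int), (R - row).toNat ≤ n →
    pvWalkA R row col
      = (PySem.List.pyRange row (min R (row + col + 1)) 1).map (fun r => (r, row + col - r)) := by
  intro n
  induction n with
  | zero =>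
    intro row col hn
    rw [pvWalkA, dif_neg (by omega), PySem.List.pyRange_one_eq_nil (by simp only [min_le_iff]; omega)]
    simp
  | succ n ih =>
    intro row col hn
    rw [pvWalkA]
    by_cases h : row < R ∧ 0 ≤ col
    · rw [dif_pos h]
      rw [show PySem.List.pyRange row (min R (row + col + 1)) 1
              = row :: PySem.List.pyRange (row + 1) (min R (row + col + 1)) 1 from
            PySem.List.pyRange_one_cons (by simp only [lt_min_iff]; omega)]
      rw [List.map_cons]
      rw [ih (row + 1) (col - 1) (by omega)]
      rw [show row + 1 + (col - 1) + 1 = row + col + 1 by omega]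
      congr 1
      · simp only [Prod.mk.injEq, true_and]
        omega
      · apply List.map_congr_left
        intro x _
        simp only [Prod.mk.injEq, true_and]
        omega
    · rw [dif_neg h, PySem.List.pyRange_one_eq_nil (by simp only [min_le_iff]; omega)]
      simp

lemma innerB_eq (R C s : Int) : pvInnerB R C s = pvDiag R C s := by
  unfold pvInnerB pvDiag
  rw [PySem.List.foldl_append_singleton_eq_map]
  simp

lemma map_add_pyRange_neg_one (a b k : Int) :
    (PySem.List.pyRange a b (-1)).map (· + k) = PySem.List.pyRange (a + k) (b + k) (-1) := by
  rw [PySem.List.pyRange_neg_one a b, PySem.List.pyRange_neg_one (a + k) (b + k),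
      show (a + k - (b + k)).toNat = (a - b).toNat by omega, List.map_map]
  apply List.map_congr_left
  intro x _
  simp only [Function.comp_apply]
  omega

lemma B_norm (R C : Int) :
    idx_for_diag_sw_from_br_alt R C
      = (PySem.List.pyRange (R + C - 2) (-1) (-1)).flatMap (pvDiag R C) := by
  unfold idx_for_diag_sw_from_br_alt
  rw [PySem.List.foldl_append_eq_flatMap, List.nil_append]
  exact List.flatMap_congr (fun s _ => innerB_eq R C s)

lemma A_norm (R C : Int) :
    idx_for_diag_sw_from_br R C
      = (PySem.List.pyRange (R + C - 2) (C - 1) (-1) ++ PySem.List.pyRange (C - 1) (-1) (-1)).flatMap (pvDiag R C) := by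
  unfold idx_for_diag_sw_from_br
  rw [PySem.List.foldl_append_eq_flatMap, PySem.List.foldl_append_eq_flatMap,
      List.nil_append, List.flatMap_append]
  congr 1
  · -- lower right triangle: diagonal starting at (row, C-1) is pvDiag (row + (C-1))
    rw [show PySem.List.pyRange (R + C - 2) (C - 1) (-1)
          = (PySem.List.pyRange (R - 1) 0 (-1)).map (· + (C - 1)) by
        rw [map_add_pyRange_neg_one]
        congr 1 <;> omega]
    rw [List.flatMap_map]
    apply List.flatMap_congr
    intro row hrow
    have hm := (PySem.List.mem_pyRange_neg_one).mp hrow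
    rw [walk_eq R (R - row).toNat row (C - 1) le_rfl]
    unfold pvDiag
    rw [show max 0 (row + (C - 1) - C + 1) = row by omega]
  · -- upper left triangle: diagonal starting at (0, col) is pvDiag col
    apply List.flatMap_congr
    intro col hcol
    have hm := (PySem.List.mem_pyRange_neg_one).mp hcol
    rw [walk_eq R (R - 0).toNat 0 col le_rfl]
    unfold pvDiag
    rw [show max 0 (col - C + 1) = 0 by omega, show (0 : Int) + col + 1 = col + 1 by omega]
    apply List.map_congr_left
    intro x _
    simp only [Prod.mk.injEq, true_and]
    omega

lemma range_splice (R C : Int) (hR : 1 ≤ R) (hC : 1 ≤ C) :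
    PySem.List.pyRange (R + C - 2) (C - 1) (-1) ++ PySem.List.pyRange (C - 1) (-1) (-1)
      = PySem.List.pyRange (R + C - 2) (-1) (-1) := by
  rw [PySem.List.pyRange_neg_one_eq_reverse (R + C - 2) (C - 1),
      PySem.List.pyRange_neg_one_eq_reverse (C - 1) (-1),
      PySem.List.pyRange_neg_one_eq_reverse (R + C - 2) (-1),
      ← List.reverse_append]
  congr 1
  rw [show (-1 : Int) + 1 = 0 by omega]
  exact (PySem.List.pyRange_one_append 0 (C - 1 + 1) (R + C - 2 + 1) (by omega) (by omega)).symm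

lemma diag_nil (R C s : Int) (h : R ≤ 0 ∨ C ≤ 0) : pvDiag R C s = [] := by
  unfold pvDiag
  rw [PySem.List.pyRange_one_eq_nil (by simp only [min_le_iff, le_max_iff]; omega)]
  simp

-- ===== VERDICT =====
theorem idx_for_diag_sw_from_br_spec : Claim_equal_idx_for_diag_sw_from_br := by
  intro R C _hDom
  unfold Spec_idx_for_diag_sw_from_br
  rw [A_norm, B_norm]
  by_cases h : 1 ≤ R ∧ 1 ≤ C
  · rw [range_splice R C h.1 h.2]
  · rw [List.flatMap_eq_nil_iff.mpr (fun s _ => diag_nil R C s (by omega)),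
        List.flatMap_eq_nil_iff.mpr (fun s _ => diag_nil R C s (by omega))]
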